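-- pv_equiv track=rewrite | github.com/andimarafioti/intercomunicador | helpers/utils.py | inv_duration
-- ===== SOURCE A (Python) =====
-- def inv_duration(duracion_string):
-- 	l = duracion_string.split(":")
-- 	l.reverse()
-- 	i = 0
-- 	total = 0
-- 	for num in l:
-- 		num = int(num)
-- 		total += num*(60**i)
-- 		i+=1
-- 	return total
-- ===== SOURCE B (Python) =====
-- def inv_duration(duracion_string):
--     total = 0
--     for part in duracion_string.split(":"):
--         total = total * 60 + int(part)
--     return total
-- ===== Notes on version B (the rewrite author's own statement) =====
-- stated objective: simpler
-- what changed: Replaced the reverse-the-list, positional-index and 60**i power-weighting loop with a single left-to-right Horner fold that keeps one accumulator (total = total*60 + int(part)).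
import Mathlib
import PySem

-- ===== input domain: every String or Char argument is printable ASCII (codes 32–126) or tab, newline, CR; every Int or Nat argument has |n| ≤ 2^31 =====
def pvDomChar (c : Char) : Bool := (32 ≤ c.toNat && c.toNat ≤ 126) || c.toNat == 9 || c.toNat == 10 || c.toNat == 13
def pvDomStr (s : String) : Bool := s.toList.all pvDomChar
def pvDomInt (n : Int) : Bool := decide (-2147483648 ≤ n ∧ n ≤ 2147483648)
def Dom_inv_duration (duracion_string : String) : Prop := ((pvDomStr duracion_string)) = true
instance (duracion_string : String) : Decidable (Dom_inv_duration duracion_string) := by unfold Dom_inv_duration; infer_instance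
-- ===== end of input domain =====

-- B replaces A's reverse + positional 60**i weighting with a left-to-right Horner fold; objective: simpler.

-- ===== PORT A =====
-- A: split on ":", reverse, then accumulate num*(60**i) with a running position index i.
def inv_duration (duracion_string : String) : Int :=
  let l := (PySem.Str.split? duracion_string ":").getD []   -- sep = ":" ≠ "", so split? is always some
  let l := l.reverse
  (l.foldl (fun (st : Nat × Int) num =>
      let num : Int := (PySem.Int.ofStr? num).getD 0   -- int(num); Pre_ excludes the ValueError case
      (st.1 + 1, st.2 + num * (60 : Int) ^ st.1)) (0, 0)).2

-- ===== PORT B =====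
def inv_duration_alt (duracion_string : String) : Int :=
  ((PySem.Str.split? duracion_string ":").getD []).foldl
    (fun total part => total * 60 + (PySem.Int.ofStr? part).getD 0) 0

-- ===== PRECONDITION & SPEC =====
-- Pre_ excludes exactly the inputs where int() raises ValueError (some ':'-separated part is not an int literal).
def Pre_inv_duration (duracion_string : String) : Prop :=
  (((PySem.Str.split? duracion_string ":").getD []).all
    (fun p => (PySem.Int.ofStr? p).isSome)) = true
instance (duracion_string : String) : Decidable (Pre_inv_duration duracion_string) := by
  unfold Pre_inv_duration; infer_instance

def pvWitness_inv_duration : String := "1:02:3"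

def Spec_inv_duration (duracion_string : String) (out : Int) : Prop := out = inv_duration_alt duracion_string
instance (duracion_string : String) (out : Int) : Decidable (Spec_inv_duration duracion_string out) := by unfold Spec_inv_duration; infer_instance

-- ===== CLAIM (what is proved, stated in full; the proofs are below) =====
def Claim_equal_inv_duration : Prop := ∀ (duracion_string : String), Dom_inv_duration duracion_string → Pre_inv_duration duracion_string → Spec_inv_duration duracion_string (inv_duration duracion_string)

-- ===== LEMMAS AND PROOFS =====

def pvParse (p : String) : Int := (PySem.Int.ofStr? p).getD 0

def pvPoly : List String → Int
  | [] => 0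
  | p :: l => pvParse p + 60 * pvPoly l

theorem pvPoly_append (l : List String) (x : String) :
    pvPoly (l ++ [x]) = pvPoly l + pvParse x * (60 : Int) ^ l.length := by
  induction l with
  | nil => simp [pvPoly]
  | cons p l ih => simp [pvPoly, ih, List.length_cons, pow_succ]; ring

theorem pvA_fold (l : List String) (i : Nat) (t : Int) :
    (l.foldl (fun (st : Nat × Int) num =>
      (st.1 + 1, st.2 + ((PySem.Int.ofStr? num).getD 0) * (60 : Int) ^ st.1)) (i, t)).2
    = t + (60 : Int) ^ i * pvPoly l := by
  induction l generalizing i t with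
  | nil => simp [pvPoly]
  | cons p l ih =>
    simp only [List.foldl_cons, ih, pvPoly, pvParse, pow_succ]
    ring

theorem pvB_fold (l : List String) (a : Int) :
    l.foldl (fun total part => total * 60 + (PySem.Int.ofStr? part).getD 0) a
    = a * (60 : Int) ^ l.length + pvPoly l.reverse := by
  induction l generalizing a with
  | nil => simp [pvPoly]
  | cons p l ih =>
    simp only [List.foldl_cons, ih, List.reverse_cons, pvPoly_append,
      List.length_reverse, List.length_cons, pow_succ, pvParse]
    ring

-- ===== VERDICT (by name: the statement is the Claim_ definition above) =====
theorem inv_duration_spec : Claim_equal_inv_duration := by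
  intro s _ _
  show inv_duration s = inv_duration_alt s
  unfold inv_duration inv_duration_alt
  simp only [pvA_fold, pvB_fold]
  simp
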